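-- pv_equiv track=rewrite | github.com/mr-mateusz/advent-of-code-2023 | day_13/solution.py | split_examples
-- ===== SOURCE A (Python) =====
-- def split_examples(data: list[str]) -> list[list[str]]:
--     """
--     Split input data (list of str) into list of examples (each example is a list of str).
--     """
--     c = []
--     examples = []
--     for r in data:
--         if r == '':
--             examples.append(c)
--             c = []
--         else:
--             c.append(r)
--     if c:
--         examples.append(c)
--     return examples
-- ===== SOURCE B (Python) =====
-- def split_examples(data: list[str]) -> list[list[str]]:
--     """Split data into blank-line-separated groups, recursively slicing at the first blank."""
--     try:
--         i = data.index('')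
--     except ValueError:
--         return [data] if data else []
--     return [data[:i]] + split_examples(data[i + 1:])
-- ===== Notes on version B (the rewrite author's own statement) =====
-- stated objective: alternative
-- what changed: Replaces the single-pass accumulator loop by a recursive decomposition that finds the first blank line with list.index and slices the list into head group and recursively split tail.
import Mathlib
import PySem

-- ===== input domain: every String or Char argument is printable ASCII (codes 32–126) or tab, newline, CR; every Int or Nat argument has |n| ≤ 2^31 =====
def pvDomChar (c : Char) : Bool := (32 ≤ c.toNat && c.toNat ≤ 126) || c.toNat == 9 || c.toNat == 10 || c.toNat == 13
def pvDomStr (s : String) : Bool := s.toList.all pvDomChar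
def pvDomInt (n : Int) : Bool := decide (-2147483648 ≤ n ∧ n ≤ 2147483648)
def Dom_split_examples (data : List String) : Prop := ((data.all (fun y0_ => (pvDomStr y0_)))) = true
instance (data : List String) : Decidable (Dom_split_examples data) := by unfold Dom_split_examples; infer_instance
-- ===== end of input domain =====

-- B replaces A's accumulator loop by recursive slicing at the first blank line (alternative decomposition, same cost).

-- ===== PORT A =====
-- literal port of A: one fold carrying (current group c, finished examples), then append c if nonempty
def split_examples (data : List String) : List (List String) :=
  let st := data.foldl
    (fun (st : List String × List (List String)) r =>
      if r = "" then ([], st.2 ++ [st.1]) else (st.1 ++ [r], st.2))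
    ([], [])
  if st.1 ≠ [] then st.2 ++ [st.1] else st.2

-- ===== PORT B =====
-- literal port of B: find first '' via list.index (PySem.List.index?), slice and recurse
def split_examples_alt (data : List String) : List (List String) :=
  match h : PySem.List.index? data "" with
  | none => if data = [] then [] else [data]
  | some i => [data.take i] ++ split_examples_alt (data.drop (i + 1))
termination_by data.length
decreasing_by
  have := PySem.List.getElem_of_index?_eq_some h
  obtain ⟨hk, _⟩ := this
  simp [List.length_drop]
  omega

-- ===== PRECONDITION & SPEC =====
def Spec_split_examples (data : List String) (out : List (List String)) : Prop := out = split_examples_alt data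
instance (data : List String) (out : List (List String)) : Decidable (Spec_split_examples data out) := by unfold Spec_split_examples; infer_instance

-- ===== CLAIM (what is proved, stated in full; the proofs are below) =====
def Claim_equal_split_examples : Prop := ∀ (data : List String), Dom_split_examples data → Spec_split_examples data (split_examples data)

-- ===== LEMMAS AND PROOFS =====

-- common characterisation: pvSpec c data = the groups of data with partial group c pending
def pvSpec : List String → List String → List (List String)
  | c, [] => if c = [] then [] else [c]
  | c, r :: rest => if r = "" then c :: pvSpec [] rest else pvSpec (c ++ [r]) rest

theorem a_eq_spec (data : List String) : ∀ (c : List String) (ex : List (List String)),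
    (let st := data.foldl
      (fun (st : List String × List (List String)) r =>
        if r = "" then ([], st.2 ++ [st.1]) else (st.1 ++ [r], st.2)) (c, ex);
     if st.1 ≠ [] then st.2 ++ [st.1] else st.2) = ex ++ pvSpec c data := by
  induction data with
  | nil =>
      intro c ex
      simp only [List.foldl_nil, pvSpec]
      split_ifs <;> simp_all
  | cons r rest ih =>
      intro c ex
      by_cases hr : r = ""
      · simpa [hr, pvSpec, List.foldl_cons] using ih [] (ex ++ [c])
      · simpa [hr, pvSpec, List.foldl_cons] using ih (c ++ [r]) ex

theorem spec_no_blank : ∀ (data : List String) (c : List String), "" ∉ data →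
    pvSpec c data = if c ++ data = [] then [] else [c ++ data] := by
  intro data
  induction data with
  | nil => intro c _; simp [pvSpec]
  | cons r rest ih =>
      intro c hmem
      have hr : r ≠ "" := fun h => hmem (by simp [h])
      have : "" ∉ rest := fun h => hmem (by simp [h])
      simp only [pvSpec]
      rw [if_neg hr, ih (c ++ [r]) this]
      simp

theorem spec_at_index : ∀ (data : List String) (i : ℕ) (c : List String),
    PySem.List.index? data "" = some i →
    pvSpec c data = (c ++ data.take i) :: pvSpec [] (data.drop (i + 1)) := by
  intro data
  induction data with
  | nil => intro i c h; simp [PySem.List.index?_eq_idxOf?, List.idxOf?] at h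
  | cons r rest ih =>
      intro i c h
      by_cases hr : r = ""
      · subst hr
        rw [PySem.List.index?_cons_self] at h
        obtain rfl : i = 0 := by simpa using h.symm
        simp [pvSpec]
      · rw [PySem.List.index?_cons_of_ne rest hr] at h
        cases h' : PySem.List.index? rest "" with
        | none => rw [h'] at h; simp at h
        | some j =>
            rw [h'] at h
            simp only [Option.map_some, Option.some.injEq] at h
            subst h
            simp only [pvSpec, if_neg hr]
            rw [ih j (c ++ [r]) h']
            simp

theorem alt_eq_spec_aux : ∀ (n : ℕ) (data : List String), data.length ≤ n →
    split_examples_alt data = pvSpec [] data := by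
  intro n
  induction n with
  | zero =>
      intro data hlen
      obtain rfl : data = [] := by simpa using List.length_eq_zero_iff.mp (Nat.le_zero.mp hlen)
      rw [split_examples_alt]
      simp [pvSpec, PySem.List.index?_eq_idxOf?]
  | succ n ih =>
      intro data hlen
      rw [split_examples_alt]
      cases h : PySem.List.index? data "" with
      | none =>
          have hmem : "" ∉ data := (PySem.List.index?_eq_none_iff data "").mp h
          rw [spec_no_blank data [] hmem]
          simp
      | some i =>
          rw [spec_at_index data i [] h]
          have hk := (PySem.List.getElem_of_index?_eq_some h).1
          have hd : (data.drop (i + 1)).length ≤ n := by simp [List.length_drop]; omega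
          simp [ih _ hd]

theorem alt_eq_spec (data : List String) : split_examples_alt data = pvSpec [] data :=
  alt_eq_spec_aux data.length data le_rfl

-- ===== VERDICT (by name: the statement is the Claim_ definition above) =====
theorem split_examples_spec : Claim_equal_split_examples := by
  intro data _
  unfold Spec_split_examples split_examples
  rw [alt_eq_spec]
  simpa using a_eq_spec data [] []
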